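-- pv_equiv track=rewrite | github.com/CryAndRRich/hustack | leetcode/dp/3610_Minimum_Number_of_Primes_to_Sum_to_Target/codes/eratosthenes.py | minNumberOfPrimes
-- ===== SOURCE A (Python) =====
-- from typing import List
--
-- def minNumberOfPrimes(n: int, m: int) -> int:
--     def generate_primes(limit_count: int) -> List[int]:
--         size = 8000
--         is_prime = [True] * size
--         is_prime[0] = is_prime[1] = False
--
--         for i in range(2, int(size ** 0.5) + 1):
--             if is_prime[i]:
--                 for j in range(i * i, size, i):
--                     is_prime[j] = False
--
--         primes = [i for i, val in enumerate(is_prime) if val]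
--         return primes[:limit_count]
--
--     primes = generate_primes(m)
--     dp = [float("inf")] * (n + 1)
--     dp[0] = 0
--
--     for p in primes:
--         for i in range(p, n + 1):
--             if dp[i - p] + 1 < dp[i]:
--                 dp[i] = dp[i - p] + 1
--
--     return dp[n] if dp[n] != float("inf") else -1
-- ===== SOURCE B (Python) =====
-- from typing import List
--
-- def minNumberOfPrimes(n: int, m: int) -> int:
--     # BFS by number of primes used: layer k holds every amount < n writable as a
--     # sum of exactly k of the candidate primes; return the first layer index
--     # from which one more prime reaches n exactly.
--     def generate_primes(limit_count: int) -> List[int]: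
--         size = 8000
--         is_prime = [True] * size
--         is_prime[0] = is_prime[1] = False
--
--         for i in range(2, int(size ** 0.5) + 1):
--             if is_prime[i]:
--                 for j in range(i * i, size, i):
--                     is_prime[j] = False
--
--         primes = [i for i, val in enumerate(is_prime) if val]
--         return primes[:limit_count]
--
--     primes = generate_primes(m)
--     if n == 0:
--         return 0
--     seen = [False] * (n + 1)
--     seen[0] = True
--     frontier = [0]
--     k = 0
--     while frontier:
--         k += 1
--         new = []
--         for s in frontier:
--             for p in primes:
--                 t = s + p
--                 if t == n:
--                     return k
--                 if t < n and not seen[t]: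
--                     seen[t] = True
--                     new.append(t)
--         frontier = new
--     return -1
-- ===== Notes on version B (the rewrite author's own statement) =====
-- stated objective: alternative
-- what changed: B keeps the same sieve but replaces A's coin-change min-table DP (relaxing an inf-table once per prime) by a breadth-first search layered by the number of primes used: a frontier of newly reachable amounts and a visited array, returning the first layer index that steps exactly onto n; no minimum is ever computed.
import Mathlib
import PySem

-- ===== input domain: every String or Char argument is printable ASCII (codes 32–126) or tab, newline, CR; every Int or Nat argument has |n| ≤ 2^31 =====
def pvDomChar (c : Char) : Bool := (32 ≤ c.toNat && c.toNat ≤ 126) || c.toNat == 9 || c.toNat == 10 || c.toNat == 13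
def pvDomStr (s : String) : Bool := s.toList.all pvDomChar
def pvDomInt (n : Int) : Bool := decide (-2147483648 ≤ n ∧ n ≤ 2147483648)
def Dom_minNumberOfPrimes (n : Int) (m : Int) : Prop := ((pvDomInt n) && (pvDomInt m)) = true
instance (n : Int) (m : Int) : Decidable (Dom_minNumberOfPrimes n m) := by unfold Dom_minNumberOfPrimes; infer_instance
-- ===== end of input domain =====

-- B keeps A's sieve for the candidate primes but replaces A's min-table coin-change DP by a
-- breadth-first search layered by the number of primes used (frontier + visited array, returning
-- the first layer that steps exactly onto n); same cost class, no minimum is ever computed.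

-- ===== PORT A =====
-- Python lists are ported as Lean Arrays (O(1) index/assign/append, like CPython lists);
-- pvAGet/pvASet are Python's a[i] read/write (exact for in-range indices, including negative
-- wraparound; out-of-range accesses, where Python raises, are excluded by Pre_).
-- Python's float("inf") table entries are modelled as `none : Option Int` (the table only ever
-- holds ints and inf, and the two operations used on them are ported exactly by pvLtInf/pvAdd1).
def pvIdx (size : Nat) (i : Int) : Nat := if i < 0 then (i + (size : Int)).toNat else i.toNat

def pvAGet {α : Type} (a : Array α) (i : Int) (d : α) : α := (a[pvIdx a.size i]?).getD d

def pvASet {α : Type} (a : Array α) (i : Int) (v : α) : Array α :=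
  a.setIfInBounds (pvIdx a.size i) v

def pvAdd1 (o : Option Int) : Option Int := o.map (· + 1)   -- x + 1 (inf + 1 = inf)

def pvLtInf : Option Int → Option Int → Bool                -- x < y (inf compares as in Python)
  | some x, some y => decide (x < y)
  | some _, none   => true
  | none,   _      => false

-- `generate_primes`: both Source A and Source B contain this identical sieve helper; ported once.
def pvGeneratePrimes (limitCount : Int) : List Int :=
  let size : Int := 8000
  let isPrime : Array Bool := Array.replicate 8000 true
  let isPrime := pvASet isPrime 0 false
  let isPrime := pvASet isPrime 1 false
  -- int(size ** 0.5) = 89 (exact: ⌊√8000⌋ = 89, the float sqrt is not an integer)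
  let isPrime := (PySem.List.pyRange 2 (89 + 1) 1).foldl (fun ip i =>
    if pvAGet ip i false then
      (PySem.List.pyRange (i * i) size i).foldl (fun ip2 j => pvASet ip2 j false) ip
    else ip) isPrime
  let primes := ((PySem.List.enumerate isPrime.toList 0).filter (fun x => x.2)).map (fun x => x.1)
  PySem.List.slice primes none (some limitCount)

def minNumberOfPrimes (n : Int) (m : Int) : Int :=
  let primes := pvGeneratePrimes m
  let dp : Array (Option Int) := Array.replicate (n + 1).toNat none
  let dp := pvASet dp 0 (some 0)
  let dp := primes.foldl (fun dp p =>
    (PySem.List.pyRange p (n + 1) 1).foldl (fun dp i =>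
      if pvLtInf (pvAdd1 (pvAGet dp (i - p) none)) (pvAGet dp i none)
      then pvASet dp i (pvAdd1 (pvAGet dp (i - p) none))
      else dp) dp) dp
  match pvAGet dp n none with
  | some v => v
  | none => -1

-- ===== PORT B =====
-- Source B's innermost `for p in primes` for one frontier element s: `none` = the Python `return k`
-- fired, `some (seen, new)` = the loop ran through with the updated visited array / new frontier.
def pvInnerP (n : Int) (s : Int) : List Int → Array Bool → List Int → Option (Array Bool × List Int)
  | [], seen, new => some (seen, new)
  | p :: ps, seen, new =>
    let t := s + p
    if t = n then none
    else if t < n ∧ pvAGet seen t false = false then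
      pvInnerP n s ps (pvASet seen t true) (new ++ [t])
    else pvInnerP n s ps seen new

-- Source B's `for s in frontier` pass
def pvInnerF (primes : List Int) (n : Int) : List Int → Array Bool → List Int → Option (Array Bool × List Int)
  | [], seen, new => some (seen, new)
  | s :: ss, seen, new =>
    match pvInnerP n s primes seen new with
    | none => none
    | some (seen', new') => pvInnerF primes n ss seen' new'

-- Source B's `while frontier` loop; fuel is a termination guard only (n iterations always suffice:
-- the answer is at most n since every prime is ≥ 2, see pvMof_le_self below)
def pvLoopB (primes : List Int) (n : Int) : Nat → Array Bool → List Int → Int → Int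
  | 0, _, _, _ => -1
  | fuel + 1, seen, frontier, k =>
    match frontier with
    | [] => -1
    | _ :: _ =>
      match pvInnerF primes n frontier seen [] with
      | none => k + 1
      | some (seen', new') => pvLoopB primes n fuel seen' new' (k + 1)

def minNumberOfPrimes_alt (n : Int) (m : Int) : Int :=
  let primes := pvGeneratePrimes m
  if n = 0 then 0
  else
    let seen : Array Bool := Array.replicate (n + 1).toNat false
    let seen := pvASet seen 0 true
    pvLoopB primes n n.toNat seen [0] 0

-- ===== PRECONDITION & SPEC =====
-- A raises IndexError exactly when n < 0 (dp is then the empty list and `dp[0] = 0` fails;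
-- B's seen-array initialisation fails there the same way).
def Pre_minNumberOfPrimes (n : Int) (m : Int) : Prop := 0 ≤ n
instance (n : Int) (m : Int) : Decidable (Pre_minNumberOfPrimes n m) := by
  unfold Pre_minNumberOfPrimes; infer_instance

def pvWitness_minNumberOfPrimes : Int × Int := (7, 5)

def Spec_minNumberOfPrimes (n : Int) (m : Int) (out : Int) : Prop := out = minNumberOfPrimes_alt n m
instance (n : Int) (m : Int) (out : Int) : Decidable (Spec_minNumberOfPrimes n m out) := by
  unfold Spec_minNumberOfPrimes; infer_instance

-- ===== CLAIM (what is proved, stated in full; the proofs are below) =====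
def Claim_equal_minNumberOfPrimes : Prop := ∀ (n : Int) (m : Int), Dom_minNumberOfPrimes n m → Pre_minNumberOfPrimes n m → Spec_minNumberOfPrimes n m (minNumberOfPrimes n m)

-- ===== LEMMAS AND PROOFS =====

-- min-with-infinity algebra on Option Int (none = +inf)
def pvOmin : Option Int → Option Int → Option Int
  | none, b => b
  | some x, none => some x
  | some x, some y => some (min x y)

def pvOle : Option Int → Option Int → Prop
  | _, none => True
  | none, some _ => False
  | some x, some y => x ≤ y

theorem pvOle_refl (a : Option Int) : pvOle a a := by
  cases a <;> simp [pvOle]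

theorem pvOle_none (a : Option Int) : pvOle a none := by
  cases a <;> simp [pvOle]

theorem pvOle_trans {a b c : Option Int} (h1 : pvOle a b) (h2 : pvOle b c) : pvOle a c := by
  cases a <;> cases b <;> cases c <;> simp_all [pvOle] <;> omega

theorem pvOle_antisymm {a b : Option Int} (h1 : pvOle a b) (h2 : pvOle b a) : a = b := by
  cases a <;> cases b <;> simp_all [pvOle] <;> omega

theorem pvOmin_le_left (a b : Option Int) : pvOle (pvOmin a b) a := by
  cases a <;> cases b <;> simp [pvOle, pvOmin]

theorem pvOmin_le_right (a b : Option Int) : pvOle (pvOmin a b) b := by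
  cases a <;> cases b <;> simp [pvOle, pvOmin]

theorem pvOle_omin {c a b : Option Int} (h1 : pvOle c a) (h2 : pvOle c b) : pvOle c (pvOmin a b) := by
  cases a <;> cases b <;> cases c <;> simp_all [pvOle, pvOmin] <;> omega

theorem pvOmin_choice (a b : Option Int) : pvOmin a b = a ∨ pvOmin a b = b := by
  cases a with
  | none => right; rfl
  | some x =>
    cases b with
    | none => left; rfl
    | some y =>
      rcases min_choice x y with h | h
      · left; simp [pvOmin, h]
      · right; simp [pvOmin, h]

theorem pvAdd1_mono {a b : Option Int} (h : pvOle a b) : pvOle (pvAdd1 a) (pvAdd1 b) := by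
  cases a <;> cases b <;> simp_all [pvOle, pvAdd1]

theorem pvAdd1_omin (a b : Option Int) : pvAdd1 (pvOmin a b) = pvOmin (pvAdd1 a) (pvAdd1 b) := by
  cases a with
  | none => rfl
  | some x =>
    cases b with
    | none => rfl
    | some y => simp only [pvOmin, pvAdd1, Option.map_some]; congr 1; omega

-- the relaxation `dp[i] = dp[i-p]+1 if dp[i-p]+1 < dp[i]` IS min-with-infinity
theorem pvRelax_eq (x y : Option Int) :
    (if pvLtInf (pvAdd1 x) y then pvAdd1 x else y) = pvOmin y (pvAdd1 x) := by
  cases x <;> cases y <;>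
    simp only [pvLtInf, pvAdd1, pvOmin, Option.map_some, Option.map_none, if_true, if_false,
      decide_eq_true_eq, Bool.false_eq_true] <;>
    (try split_ifs with hh) <;> (try rfl) <;> (congr 1; omega)

theorem pvAGet_natCast {α : Type} (a : Array α) (j : Nat) (d : α) :
    pvAGet a (j : Int) d = (a[j]?).getD d := by
  unfold pvAGet pvIdx
  rw [if_neg (by omega), Int.toNat_natCast]

theorem pvAGet_of_nonneg {α : Type} (a : Array α) (i : Int) (d : α) (h : 0 ≤ i) :
    pvAGet a i d = (a[i.toNat]?).getD d := by
  unfold pvAGet pvIdx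
  rw [if_neg (by omega)]

theorem pvASet_natCast {α : Type} (a : Array α) (j : Nat) (v : α) :
    pvASet a (j : Int) v = a.setIfInBounds j v := by
  unfold pvASet pvIdx
  rw [if_neg (by omega), Int.toNat_natCast]

theorem pvASet_of_nonneg {α : Type} (a : Array α) (i : Int) (v : α) (h : 0 ≤ i) :
    pvASet a i v = a.setIfInBounds i.toNat v := by
  unfold pvASet pvIdx
  rw [if_neg (by omega)]

-- `min over the qualifying primes p ∈ S (0 < p ≤ i) of t p`, starting from acc
def pvFoldMin (i : Nat) (t : Int → Option Int) (S : List Int) (acc : Option Int) : Option Int :=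
  S.foldl (fun acc p => if 0 < p ∧ p ≤ (i : Int) then pvOmin acc (t p) else acc) acc

theorem pvFoldMin_cons (i : Nat) (t : Int → Option Int) (p : Int) (S : List Int) (acc : Option Int) :
    pvFoldMin i t (p :: S) acc
      = pvFoldMin i t S (if 0 < p ∧ p ≤ (i : Int) then pvOmin acc (t p) else acc) := by
  simp [pvFoldMin]

theorem pvFoldMin_append_singleton (i : Nat) (t : Int → Option Int) (P : List Int) (p : Int)
    (acc : Option Int) :
    pvFoldMin i t (P ++ [p]) acc
      = if 0 < p ∧ p ≤ (i : Int) then pvOmin (pvFoldMin i t P acc) (t p)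
        else pvFoldMin i t P acc := by
  simp [pvFoldMin, List.foldl_append]

theorem pvFoldMin_le_acc (i : Nat) (t : Int → Option Int) :
    ∀ (S : List Int) (acc : Option Int), pvOle (pvFoldMin i t S acc) acc := by
  intro S
  induction S with
  | nil => intro acc; exact pvOle_refl acc
  | cons p S ih =>
    intro acc
    rw [pvFoldMin_cons]
    by_cases h : 0 < p ∧ p ≤ (i : Int)
    · rw [if_pos h]
      exact pvOle_trans (ih _) (pvOmin_le_left _ _)
    · rw [if_neg h]; exact ih _

theorem pvFoldMin_le_mem (i : Nat) (t : Int → Option Int) {q : Int} :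
    ∀ (S : List Int) (acc : Option Int), q ∈ S → 0 < q → q ≤ (i : Int) →
      pvOle (pvFoldMin i t S acc) (t q) := by
  intro S
  induction S with
  | nil => intro acc h; cases h
  | cons p S ih =>
    intro acc hmem h1 h2
    rw [pvFoldMin_cons]
    rcases List.mem_cons.mp hmem with rfl | hmem
    · rw [if_pos ⟨h1, h2⟩]
      exact pvOle_trans (pvFoldMin_le_acc i t S _) (pvOmin_le_right _ _)
    · exact ih _ hmem h1 h2

theorem pvFoldMin_attain (i : Nat) (t : Int → Option Int) :
    ∀ (S : List Int) (acc : Option Int),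
      pvFoldMin i t S acc = acc ∨
        ∃ q, q ∈ S ∧ (0 < q ∧ q ≤ (i : Int)) ∧ pvFoldMin i t S acc = t q := by
  intro S
  induction S with
  | nil => intro acc; left; rfl
  | cons p S ih =>
    intro acc
    rw [pvFoldMin_cons]
    by_cases h : 0 < p ∧ p ≤ (i : Int)
    · rw [if_pos h]
      rcases ih (pvOmin acc (t p)) with h1 | ⟨q, hq1, hq2, hq3⟩
      · rw [h1]
        rcases pvOmin_choice acc (t p) with h2 | h2
        · left; exact h2
        · right; exact ⟨p, List.mem_cons_self, h, h2⟩
      · right; exact ⟨q, List.mem_cons_of_mem _ hq1, hq2, hq3⟩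
    · rw [if_neg h]
      rcases ih acc with h1 | ⟨q, hq1, hq2, hq3⟩
      · left; exact h1
      · right; exact ⟨q, List.mem_cons_of_mem _ hq1, hq2, hq3⟩

theorem pvFoldMin_congr (i : Nat) {t t' : Int → Option Int} {S : List Int}
    (h : ∀ p ∈ S, 0 < p → p ≤ (i : Int) → t p = t' p) (acc : Option Int) :
    pvFoldMin i t S acc = pvFoldMin i t' S acc := by
  unfold pvFoldMin
  apply PySem.List.foldl_congr_mem
  intro acc p hp
  by_cases hc : 0 < p ∧ p ≤ (i : Int)
  · rw [if_pos hc, if_pos hc, h p hp hc.1 hc.2]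
  · rw [if_neg hc, if_neg hc]

-- the Bellman function: pvMof S i = min number of elements of S (each > 0, used with
-- repetition) summing to i, as Option Int with none = impossible
def pvMAux (S : List Int) : Nat → Nat → Option Int
  | 0, i => if i = 0 then some 0 else none
  | f + 1, i =>
    if i = 0 then some 0
    else pvFoldMin i (fun p => pvAdd1 (pvMAux S f (i - p.toNat))) S none

def pvMof (S : List Int) (i : Nat) : Option Int := pvMAux S i i

theorem pvMAux_congr (S : List Int) :
    ∀ (f g i : Nat), i ≤ f → i ≤ g → pvMAux S f i = pvMAux S g i := by
  intro f
  induction f with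
  | zero =>
    intro g i hf _
    interval_cases i
    cases g <;> simp [pvMAux]
  | succ f ih =>
    intro g i hf hg
    cases g with
    | zero =>
      interval_cases i
      simp [pvMAux]
    | succ g =>
      by_cases hi : i = 0
      · simp [pvMAux, hi]
      · simp only [pvMAux, if_neg hi]
        apply pvFoldMin_congr
        intro p _ hp0 hpi
        rw [ih g (i - p.toNat) (by omega) (by omega)]

theorem pvMof_eq (S : List Int) (i : Nat) :
    pvMof S i = if i = 0 then some 0
      else pvFoldMin i (fun p => pvAdd1 (pvMof S (i - p.toNat))) S none := by
  cases i with
  | zero => rfl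
  | succ k =>
    show pvMAux S (k + 1) (k + 1) = _
    simp only [pvMAux, if_neg (Nat.succ_ne_zero k)]
    apply pvFoldMin_congr
    intro p _ hp0 hpi
    rw [pvMAux_congr S k (k + 1 - p.toNat) (k + 1 - p.toNat) (by omega) (by omega)]
    rfl

theorem pvMof_bellman_le (S : List Int) {q : Int} {i : Nat}
    (hq : q ∈ S) (h1 : 0 < q) (h2 : q ≤ (i : Int)) :
    pvOle (pvMof S i) (pvAdd1 (pvMof S (i - q.toNat))) := by
  have hi : i ≠ 0 := by omega
  rw [pvMof_eq, if_neg hi]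
  exact pvFoldMin_le_mem i _ S none hq h1 h2

theorem pvMof_append_ole (P : List Int) (p₀ : Int) :
    ∀ i : Nat, pvOle (pvMof (P ++ [p₀]) i) (pvMof P i) := by
  intro i
  induction i using Nat.strong_induction_on with
  | _ i ih =>
    by_cases hi : i = 0
    · subst hi; exact pvOle_refl _
    · conv_rhs => rw [pvMof_eq, if_neg hi]
      rcases pvFoldMin_attain i (fun p => pvAdd1 (pvMof P (i - p.toNat))) P none
        with h | ⟨q, hq1, hq2, hq3⟩
      · rw [h]; exact pvOle_none _
      · rw [hq3]
        have h1 : pvOle (pvMof (P ++ [p₀]) i) (pvAdd1 (pvMof (P ++ [p₀]) (i - q.toNat))) :=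
          pvMof_bellman_le (P ++ [p₀]) (List.mem_append_left _ hq1) hq2.1 hq2.2
        exact pvOle_trans h1 (pvAdd1_mono (ih (i - q.toNat) (by omega)))

theorem pvMof_append_skip (P : List Int) (p₀ : Int) :
    ∀ i : Nat, (p₀ ≤ 0 ∨ (i : Int) < p₀) → pvMof (P ++ [p₀]) i = pvMof P i := by
  intro i
  induction i using Nat.strong_induction_on with
  | _ i ih =>
    intro h
    by_cases hi : i = 0
    · subst hi; rfl
    · rw [pvMof_eq, if_neg hi, pvMof_eq P, if_neg hi]
      rw [pvFoldMin_append_singleton, if_neg (by rcases h with h | h <;> omega)]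
      apply pvFoldMin_congr
      intro p _ hp0 hpi
      rw [ih (i - p.toNat) (by omega) (by rcases h with h | h; exact Or.inl h; right; omega)]

theorem pvMof_append_exchange (P : List Int) (p₀ : Int) (h0 : 0 < p₀) :
    ∀ i : Nat, p₀ ≤ (i : Int) →
      pvMof (P ++ [p₀]) i
        = pvOmin (pvMof P i) (pvAdd1 (pvMof (P ++ [p₀]) (i - p₀.toNat))) := by
  intro i
  induction i using Nat.strong_induction_on with
  | _ i ih =>
    intro hp
    have hi : i ≠ 0 := by omega
    apply pvOle_antisymm
    · apply pvOle_omin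
      · exact pvMof_append_ole P p₀ i
      · rw [pvMof_eq, if_neg hi]
        exact pvFoldMin_le_mem i _ _ none
          (List.mem_append_right _ (by simp : p₀ ∈ [p₀])) h0 hp
    · conv_rhs => rw [pvMof_eq, if_neg hi]
      rcases pvFoldMin_attain i (fun p => pvAdd1 (pvMof (P ++ [p₀]) (i - p.toNat)))
        (P ++ [p₀]) none with h | ⟨q, hq1, hq2, hq3⟩
      · rw [h]; exact pvOle_none _
      · rw [hq3]
        rcases List.mem_append.mp hq1 with hqP | hqp
        · by_cases hc : p₀ ≤ ((i - q.toNat : Nat) : Int)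
          · rw [ih (i - q.toNat) (by omega) hc, pvAdd1_omin]
            apply pvOle_omin
            · exact pvOle_trans (pvOmin_le_left _ _) (pvMof_bellman_le P hqP hq2.1 hq2.2)
            · have h1 : pvOle (pvMof (P ++ [p₀]) (i - p₀.toNat))
                  (pvAdd1 (pvMof (P ++ [p₀]) ((i - p₀.toNat) - q.toNat))) :=
                pvMof_bellman_le (P ++ [p₀]) (List.mem_append_left _ hqP) hq2.1 (by omega)
              have he : (i - p₀.toNat) - q.toNat = (i - q.toNat) - p₀.toNat := by omega
              rw [he] at h1
              exact pvOle_trans (pvOmin_le_right _ _) (pvAdd1_mono h1)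
          · rw [pvMof_append_skip P p₀ (i - q.toNat) (Or.inr (by omega))]
            exact pvOle_trans (pvOmin_le_left _ _) (pvMof_bellman_le P hqP hq2.1 hq2.2)
        · have hq : q = p₀ := List.mem_singleton.mp hqp
          subst hq
          exact pvOmin_le_right _ _

-- one full inner pass of A for prime p₀, as a function on amounts
def pvPassAux (p₀ : Int) (t : Nat → Option Int) : Nat → Nat → Option Int
  | 0, j => t j
  | f + 1, j =>
    if (j : Int) < p₀ then t j
    else pvOmin (t j) (pvAdd1 (pvPassAux p₀ t f (j - p₀.toNat)))

def pvPass (p₀ : Int) (t : Nat → Option Int) (j : Nat) : Option Int := pvPassAux p₀ t j j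

theorem pvPassAux_congr (p₀ : Int) (h0 : 0 < p₀) (t : Nat → Option Int) :
    ∀ (f g j : Nat), j ≤ f → j ≤ g → pvPassAux p₀ t f j = pvPassAux p₀ t g j := by
  intro f
  induction f with
  | zero =>
    intro g j hf _
    interval_cases j
    cases g with
    | zero => rfl
    | succ g => simp only [pvPassAux]; rw [if_pos (by exact_mod_cast h0)]
  | succ f ih =>
    intro g j hf hg
    cases g with
    | zero =>
      interval_cases j
      simp only [pvPassAux]; rw [if_pos (by exact_mod_cast h0)]
    | succ g =>
      simp only [pvPassAux]
      by_cases hj : (j : Int) < p₀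
      · rw [if_pos hj, if_pos hj]
      · rw [if_neg hj, if_neg hj, ih g (j - p₀.toNat) (by omega) (by omega)]

theorem pvPass_eq (p₀ : Int) (h0 : 0 < p₀) (t : Nat → Option Int) (j : Nat) :
    pvPass p₀ t j = if (j : Int) < p₀ then t j
      else pvOmin (t j) (pvAdd1 (pvPass p₀ t (j - p₀.toNat))) := by
  cases j with
  | zero =>
    show pvPassAux p₀ t 0 0 = _
    rw [if_pos (by exact_mod_cast h0)]
    rfl
  | succ k =>
    show pvPassAux p₀ t (k + 1) (k + 1) = _
    simp only [pvPassAux]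
    by_cases hj : ((k + 1 : Nat) : Int) < p₀
    · rw [if_pos hj, if_pos hj]
    · rw [if_neg hj, if_neg hj,
        pvPassAux_congr p₀ h0 t k (k + 1 - p₀.toNat) (k + 1 - p₀.toNat) (by omega) (by omega)]
      rfl

theorem pvPass_main (P : List Int) (p₀ : Int) (h0 : 0 < p₀) :
    ∀ j : Nat, pvPass p₀ (pvMof P) j = pvMof (P ++ [p₀]) j := by
  intro j
  induction j using Nat.strong_induction_on with
  | _ j ih =>
    rw [pvPass_eq p₀ h0]
    by_cases hj : (j : Int) < p₀
    · rw [if_pos hj, pvMof_append_skip P p₀ j (Or.inr hj)]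
    · rw [if_neg hj, ih (j - p₀.toNat) (by omega),
        pvMof_append_exchange P p₀ h0 j (le_of_not_gt hj)]

-- table/function relation for A's dp array (size N+1, entries t 0 .. t N)
def pvTB (N : Nat) (dp : Array (Option Int)) (t : Nat → Option Int) : Prop :=
  dp.size = N + 1 ∧ ∀ j : Nat, j ≤ N → dp[j]? = some (t j)

def pvPassUpto (p : Int) (t : Nat → Option Int) (B : Int) (j : Nat) : Option Int :=
  if (j : Int) < B then pvPass p t j else t j

theorem pvInnerA_aux (N : Nat) (p : Int) (hp : 0 < p) (t : Nat → Option Int)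
    (dp : Array (Option Int)) (h : pvTB N dp t) :
    ∀ K : Nat, p + (K : Int) ≤ (N : Int) + 1 →
      pvTB N ((PySem.List.pyRange p (p + (K : Int)) 1).foldl (fun dp i =>
        if pvLtInf (pvAdd1 (pvAGet dp (i - p) none)) (pvAGet dp i none)
        then pvASet dp i (pvAdd1 (pvAGet dp (i - p) none))
        else dp) dp)
        (pvPassUpto p t (p + (K : Int))) := by
  intro K
  induction K with
  | zero =>
    intro _
    rw [show p + ((0 : Nat) : Int) = p by simp, PySem.List.pyRange_one_eq_nil (le_refl p)]
    simp only [List.foldl_nil]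
    refine ⟨h.1, ?_⟩
    intro j hj
    rw [h.2 j hj]
    unfold pvPassUpto
    by_cases hjp : (j : Int) < p
    · rw [if_pos hjp, pvPass_eq p hp, if_pos hjp]
    · rw [if_neg hjp]
  | succ K ihK =>
    intro hK
    have hK' : p + (K : Int) ≤ (N : Int) + 1 := by push_cast at hK ⊢; omega
    obtain ⟨ih1, ih2⟩ := ihK hK'
    rw [show p + ((K + 1 : Nat) : Int) = (p + (K : Int)) + 1 by push_cast; ring,
      PySem.List.pyRange_one_succ_right (by omega), List.foldl_append]
    simp only [List.foldl_cons, List.foldl_nil]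
    set dp' := (PySem.List.pyRange p (p + (K : Int)) 1).foldl (fun dp i =>
        if pvLtInf (pvAdd1 (pvAGet dp (i - p) none)) (pvAGet dp i none)
        then pvASet dp i (pvAdd1 (pvAGet dp (i - p) none))
        else dp) dp with hdp'
    set j₀ : Nat := (p + (K : Int)).toNat with hj₀def
    have hj₀ : (j₀ : Int) = p + (K : Int) := Int.toNat_of_nonneg (by omega)
    have hj₀N : j₀ ≤ N := by omega
    have hKN : K ≤ N := by omega
    have hup : ∀ (B : Int) (j : Nat),
        pvPassUpto p t B j = if (j : Int) < B then pvPass p t j else t j := fun _ _ => rfl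
    have hread1 : pvAGet dp' (p + (K : Int) - p) none = pvPass p t K := by
      rw [show p + (K : Int) - p = ((K : Nat) : Int) by ring, pvAGet_natCast,
        ih2 K hKN, hup _ K, if_pos (by omega)]
      rfl
    have hread2 : pvAGet dp' (p + (K : Int)) none = t j₀ := by
      rw [← hj₀, pvAGet_natCast, ih2 j₀ hj₀N, hup _ j₀, if_neg (by omega)]
      rfl
    have hkey : pvPass p t j₀ = pvOmin (t j₀) (pvAdd1 (pvPass p t K)) := by
      rw [pvPass_eq p hp t j₀, if_neg (by omega), show j₀ - p.toNat = K by omega]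
    rw [hread1, hread2]
    by_cases hlt : pvLtInf (pvAdd1 (pvPass p t K)) (t j₀) = true
    · rw [if_pos hlt,
        show pvASet dp' (p + (K : Int)) (pvAdd1 (pvPass p t K))
            = dp'.setIfInBounds j₀ (pvAdd1 (pvPass p t K)) by rw [← hj₀, pvASet_natCast]]
      refine ⟨by rw [Array.size_setIfInBounds]; exact ih1, ?_⟩
      intro j hj
      rw [hup _ j]
      by_cases hjj : j = j₀
      · subst hjj
        rw [Array.getElem?_setIfInBounds, if_pos rfl, if_pos (by omega), if_pos (by omega),
          hkey, ← pvRelax_eq, if_pos hlt]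
      · rw [Array.getElem?_setIfInBounds, if_neg (fun hh => hjj hh.symm), ih2 j hj, hup _ j]
        by_cases hc : (j : Int) < p + (K : Int)
        · rw [if_pos hc, if_pos (by omega)]
        · rw [if_neg hc, if_neg (by omega)]
    · rw [if_neg hlt]
      refine ⟨ih1, ?_⟩
      intro j hj
      rw [hup _ j, ih2 j hj, hup _ j]
      by_cases hjj : j = j₀
      · subst hjj
        rw [if_neg (by omega), if_pos (by omega), hkey, ← pvRelax_eq, if_neg hlt]
      · by_cases hc : (j : Int) < p + (K : Int)
        · rw [if_pos hc, if_pos (by omega)]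
        · rw [if_neg hc, if_neg (by omega)]

theorem pvInnerA (N : Nat) (p : Int) (hp : 0 < p) (t : Nat → Option Int)
    (dp : Array (Option Int)) (h : pvTB N dp t) :
    pvTB N ((PySem.List.pyRange p ((N : Int) + 1) 1).foldl (fun dp i =>
      if pvLtInf (pvAdd1 (pvAGet dp (i - p) none)) (pvAGet dp i none)
      then pvASet dp i (pvAdd1 (pvAGet dp (i - p) none))
      else dp) dp) (pvPass p t) := by
  by_cases hbig : (N : Int) + 1 ≤ p
  · rw [PySem.List.pyRange_one_eq_nil hbig]
    simp only [List.foldl_nil]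
    refine ⟨h.1, ?_⟩
    intro j hj
    rw [h.2 j hj, pvPass_eq p hp, if_pos (by omega)]
  · set K : Nat := ((N : Int) + 1 - p).toNat with hKdef
    have hKc : p + (K : Int) = (N : Int) + 1 := by omega
    rw [← hKc]
    obtain ⟨h1, h2⟩ := pvInnerA_aux N p hp t dp h K (le_of_eq hKc)
    refine ⟨h1, ?_⟩
    intro j hj
    rw [h2 j hj, show pvPassUpto p t (p + (K : Int)) j
        = if (j : Int) < p + (K : Int) then pvPass p t j else t j from rfl,
      if_pos (by omega)]

theorem pvOuterA (N : Nat) :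
    ∀ (S : List Int), (∀ p ∈ S, 0 < p) → ∀ (dp : Array (Option Int)) (t : Nat → Option Int),
      pvTB N dp t →
      pvTB N (S.foldl (fun dp p =>
        (PySem.List.pyRange p ((N : Int) + 1) 1).foldl (fun dp i =>
          if pvLtInf (pvAdd1 (pvAGet dp (i - p) none)) (pvAGet dp i none)
          then pvASet dp i (pvAdd1 (pvAGet dp (i - p) none))
          else dp) dp) dp)
        (S.foldl (fun t p => pvPass p t) t) := by
  intro S
  induction S with
  | nil => intro _ dp t h; exact h
  | cons p S ih =>
    intro hS dp t h
    simp only [List.foldl_cons]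
    exact ih (fun q hq => hS q (List.mem_cons_of_mem _ hq)) _ _
      (pvInnerA N p (hS p List.mem_cons_self) t dp h)

theorem pvFoldPass :
    ∀ (S : List Int), (∀ p ∈ S, 0 < p) → ∀ (P : List Int),
      S.foldl (fun t p => pvPass p t) (pvMof P) = pvMof (P ++ S) := by
  intro S
  induction S with
  | nil => intro _ P; simp
  | cons p S ih =>
    intro hS P
    simp only [List.foldl_cons]
    rw [show pvPass p (pvMof P) = pvMof (P ++ [p]) from
        funext (pvPass_main P p (hS p List.mem_cons_self)),
      ih (fun q hq => hS q (List.mem_cons_of_mem _ hq)) (P ++ [p]),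
      List.append_assoc, List.singleton_append]

-- facts about the sieve's prime list: all elements ≥ 2, strictly increasing
theorem pvSetFalse_pres (k : Nat) :
    ∀ (js : List Int), (∀ j ∈ js, 0 ≤ j) → ∀ (a : Array Bool), a[k]? ≠ some true →
      ((js.foldl (fun a j => pvASet a j false) a))[k]? ≠ some true := by
  intro js
  induction js with
  | nil => intro _ a h; exact h
  | cons j js ih =>
    intro hjs a h
    simp only [List.foldl_cons]
    apply ih (fun q hq => hjs q (List.mem_cons_of_mem _ hq))
    rw [pvASet_of_nonneg _ _ _ (hjs j List.mem_cons_self), Array.getElem?_setIfInBounds]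
    split_ifs <;> simp_all

theorem pvSieve_pres (k : Nat) (a : Array Bool) (h : a[k]? ≠ some true) :
    ((PySem.List.pyRange 2 (89 + 1) 1).foldl (fun ip i =>
      if pvAGet ip i false then
        (PySem.List.pyRange (i * i) (8000 : Int) i).foldl
          (fun ip2 j => pvASet ip2 j false) ip
      else ip) a)[k]? ≠ some true := by
  refine List.foldlRecOn (motive := fun a' : Array Bool => a'[k]? ≠ some true) _ _ h ?_
  intro b hb i hi
  by_cases hip : pvAGet b i false
  · rw [if_pos hip]
    apply pvSetFalse_pres
    · intro j hj
      have h2 : 2 ≤ i := (PySem.List.mem_pyRange_one.mp hi).1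
      have := (PySem.List.mem_pyRange_iff_of_pos (by omega) j).mp hj
      nlinarith [this.1]
    · exact hb
  · rw [if_neg hip]; exact hb

theorem pvSieve01 (k : Nat) (hk1 : k ≤ 1) :
    ((PySem.List.pyRange 2 (89 + 1) 1).foldl (fun ip i =>
      if pvAGet ip i false then
        (PySem.List.pyRange (i * i) (8000 : Int) i).foldl
          (fun ip2 j => pvASet ip2 j false) ip
      else ip)
      (pvASet (pvASet (Array.replicate 8000 true) 0 false) 1 false))[k]?
      ≠ some true := by
  apply pvSieve_pres
  rw [pvASet_of_nonneg _ _ _ (by norm_num), pvASet_of_nonneg _ _ _ (by norm_num)]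
  simp only [Int.toNat_one, Int.toNat_zero]
  interval_cases k
  · rw [Array.getElem?_setIfInBounds, if_neg (by omega), Array.getElem?_setIfInBounds,
      if_pos rfl, if_pos (by rw [Array.size_replicate]; omega)]
    decide
  · rw [Array.getElem?_setIfInBounds, if_pos rfl,
      if_pos (by rw [Array.size_setIfInBounds, Array.size_replicate]; omega)]
    decide

theorem pvGeneratePrimes_two_le (m : Int) : ∀ p ∈ pvGeneratePrimes m, 2 ≤ p := by
  intro p hp
  simp only [pvGeneratePrimes] at hp
  have hp0 := PySem.List.mem_of_mem_slice _ _ _ hp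
  simp only [List.mem_map, List.mem_filter] at hp0
  obtain ⟨⟨i, b⟩, ⟨hmem, hb⟩, rfl⟩ := hp0
  rw [PySem.List.mem_enumerate_iff] at hmem
  obtain ⟨k, hk, hkeq⟩ := hmem
  rw [Prod.mk.injEq] at hkeq
  obtain ⟨hik, hbk⟩ := hkeq
  subst hik
  simp only at hb
  subst hb
  -- entry k of the final sieve is true; entries 0 and 1 are never true, so 2 ≤ k
  have hk2 : 2 ≤ k := by
    by_contra hlt
    have h5 := pvSieve01 k (by omega)
    rw [← Array.getElem?_toList, List.getElem?_eq_getElem hk] at h5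
    exact h5 (by rw [← hbk])
  show (2 : Int) ≤ 0 + (k : Int)
  omega

theorem pvSlice_sublist {α : Type} (xs : List α) (b : Int) :
    (PySem.List.slice xs none (some b)).Sublist xs := by
  simp only [PySem.List.slice]
  exact List.take_sublist _ _

theorem pvGeneratePrimes_sorted (m : Int) : (pvGeneratePrimes m).Pairwise (· < ·) := by
  simp only [pvGeneratePrimes]
  refine List.Pairwise.sublist (pvSlice_sublist _ _) ?_
  rw [List.pairwise_map]
  exact List.Pairwise.sublist List.filter_sublist (PySem.List.pairwise_lt_enumerate _ _)

-- A computes pvMof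
theorem pvA_eq (n m : Int) (hn : 0 ≤ n) :
    minNumberOfPrimes n m
      = (match pvMof (pvGeneratePrimes m) n.toNat with
         | some v => v
         | none => -1) := by
  have hnN : ((n.toNat : Nat) : Int) = n := Int.toNat_of_nonneg hn
  have hpos : ∀ p ∈ pvGeneratePrimes m, 0 < p := by
    intro p hp; have := pvGeneratePrimes_two_le m p hp; omega
  simp only [minNumberOfPrimes]
  rw [← hnN]
  set N : Nat := n.toNat with hN
  rw [show ((N : Int) + 1).toNat = N + 1 by omega,
    pvASet_of_nonneg (Array.replicate (N + 1) (none : Option Int)) 0 (some 0) (by norm_num),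
    Int.toNat_zero]
  have h0 : pvTB N ((Array.replicate (N + 1) (none : Option Int)).setIfInBounds 0 (some 0))
      (pvMof []) := by
    constructor
    · rw [Array.size_setIfInBounds, Array.size_replicate]
    · intro j hj
      cases j with
      | zero =>
        rw [Array.getElem?_setIfInBounds, if_pos rfl,
          if_pos (by rw [Array.size_replicate]; omega)]
        rfl
      | succ k =>
        rw [Array.getElem?_setIfInBounds, if_neg (by omega), Array.getElem?_replicate,
          if_pos (by omega), pvMof_eq, if_neg (Nat.succ_ne_zero k)]
        rfl
  have h1 := pvOuterA N (pvGeneratePrimes m) hpos _ _ h0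
  rw [pvFoldPass (pvGeneratePrimes m) hpos [], List.nil_append] at h1
  rw [pvAGet_natCast, h1.2 N (le_refl N)]
  rfl

-- ===== B-side: the BFS computes pvMof =====

-- basic facts about pvMof needed for the BFS invariants
theorem pvMof_zero (S : List Int) : pvMof S 0 = some 0 := rfl

theorem pvMof_nonneg (S : List Int) : ∀ (t : Nat) (v : Int), pvMof S t = some v → 0 ≤ v := by
  intro t
  induction t using Nat.strong_induction_on with
  | _ t ih =>
    intro v h
    by_cases ht : t = 0
    · subst ht
      rw [pvMof_zero] at h
      injection h with h
      omega
    · rw [pvMof_eq, if_neg ht] at h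
      rcases pvFoldMin_attain t (fun p => pvAdd1 (pvMof S (t - p.toNat))) S none
        with h1 | ⟨q, _, hq2, h1⟩
      · rw [h1] at h; cases h
      · rw [h1] at h
        cases hw : pvMof S (t - q.toNat) with
        | none => rw [hw] at h; cases h
        | some w =>
          rw [hw] at h
          simp only [pvAdd1, Option.map_some, Option.some.injEq] at h
          have := ih (t - q.toNat) (by omega) w hw
          omega

theorem pvMof_some_zero (S : List Int) (t : Nat) (h : pvMof S t = some 0) : t = 0 := by
  by_contra ht
  rw [pvMof_eq, if_neg ht] at h
  rcases pvFoldMin_attain t (fun p => pvAdd1 (pvMof S (t - p.toNat))) S none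
    with h1 | ⟨q, _, hq2, h1⟩
  · rw [h1] at h; cases h
  · rw [h1] at h
    cases hw : pvMof S (t - q.toNat) with
    | none => rw [hw] at h; cases h
    | some w =>
      rw [hw] at h
      simp only [pvAdd1, Option.map_some, Option.some.injEq] at h
      have := pvMof_nonneg S (t - q.toNat) w hw
      omega

-- L1: attainment — a positive optimum decomposes as one prime plus an optimum one smaller
theorem pvMof_attain (S : List Int) (t : Nat) (j : Int) (hj : 0 ≤ j)
    (h : pvMof S t = some (j + 1)) :
    ∃ p ∈ S, 0 < p ∧ p ≤ (t : Int) ∧ pvMof S (t - p.toNat) = some j := by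
  by_cases ht : t = 0
  · subst ht
    rw [pvMof_zero] at h
    injection h with h
    omega
  · rw [pvMof_eq, if_neg ht] at h
    rcases pvFoldMin_attain t (fun p => pvAdd1 (pvMof S (t - p.toNat))) S none
      with h1 | ⟨q, hq1, hq2, h1⟩
    · rw [h1] at h; cases h
    · rw [h1] at h
      cases hw : pvMof S (t - q.toNat) with
      | none => rw [hw] at h; cases h
      | some w =>
        rw [hw] at h
        simp only [pvAdd1, Option.map_some, Option.some.injEq] at h
        refine ⟨q, hq1, hq2.1, hq2.2, ?_⟩
        rw [hw]
        congr 1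
        omega

-- L2: one prime step can only improve by one
theorem pvOle_some_iff (x : Option Int) (c : Int) :
    pvOle x (some c) ↔ ∃ v, x = some v ∧ v ≤ c := by
  cases x with
  | none => simp [pvOle]
  | some v => simp [pvOle]

theorem pvMof_step (S : List Int) {p : Int} (t : Nat) (j : Int)
    (hp : p ∈ S) (h1 : 0 < p) (h2 : p ≤ (t : Int))
    (h : pvMof S (t - p.toNat) = some j) :
    ∃ v, pvMof S t = some v ∧ v ≤ j + 1 := by
  have hle := pvMof_bellman_le S hp h1 h2
  rw [h] at hle
  exact (pvOle_some_iff _ _).mp hle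

-- the optimum is at most t (each prime is ≥ 1)
theorem pvMof_le_self (S : List Int) : ∀ (t : Nat) (v : Int), pvMof S t = some v → v ≤ (t : Int) := by
  intro t
  induction t using Nat.strong_induction_on with
  | _ t ih =>
    intro v h
    by_cases ht : t = 0
    · subst ht
      rw [pvMof_zero] at h
      injection h with h
      omega
    · have hv0 := pvMof_nonneg S t v h
      have hv1 : v ≠ 0 := fun hv => ht (pvMof_some_zero S t (hv ▸ h))
      have hattain := pvMof_attain S t (v - 1) (by omega) (by rw [show v - 1 + 1 = v by ring]; exact h)
      obtain ⟨q, _, hq1, hq2, hq3⟩ := hattain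
      have := ih (t - q.toNat) (by omega) (v - 1) hq3
      have : ((t - q.toNat : Nat) : Int) ≤ (t : Int) - 1 := by omega
      omega

-- chain: below a positive optimum every smaller level is inhabited strictly below t
theorem pvMof_chain (S : List Int) : ∀ (t : Nat) (j i : Int), pvMof S t = some j → 0 ≤ i → i < j →
    ∃ u : Nat, u < t ∧ pvMof S u = some i := by
  intro t
  induction t using Nat.strong_induction_on with
  | _ t ih =>
    intro j i h hi hij
    obtain ⟨q, _, hq1, hq2, hq3⟩ :=
      pvMof_attain S t (j - 1) (by omega) (by rw [show j - 1 + 1 = j by ring]; exact h)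
    by_cases hcase : i = j - 1
    · exact ⟨t - q.toNat, by omega, hcase ▸ hq3⟩
    · obtain ⟨u, hu1, hu2⟩ := ih (t - q.toNat) (by omega) (j - 1) i hq3 hi (by omega)
      exact ⟨u, by omega, hu2⟩

-- BFS invariants
def pvLevelLe (S : List Int) (N : Nat) (k : Int) (t : Nat) : Prop :=
  ∃ j : Int, j ≤ k ∧ pvMof S t = some j

def pvSeenInv (S : List Int) (N : Nat) (k : Int) (seen : Array Bool) : Prop :=
  seen.size = N + 1 ∧ ∀ t : Nat, t < N → ((seen[t]?.getD false) = true ↔ pvLevelLe S N k t)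

def pvFrInv (S : List Int) (N : Nat) (k : Int) (fr : List Int) : Prop :=
  ∀ x : Int, x ∈ fr ↔ ∃ t : Nat, t < N ∧ x = (t : Int) ∧ pvMof S t = some k

def pvBlk (S : List Int) (N : Nat) (k : Int) : Prop :=
  ∀ j : Int, j ≤ k → pvMof S N ≠ some j

theorem pvInnerP_cons (n s p : Int) (ps : List Int) (seen : Array Bool) (new : List Int) :
    pvInnerP n s (p :: ps) seen new
      = (if s + p = n then none
         else if s + p < n ∧ pvAGet seen (s + p) false = false then
           pvInnerP n s ps (pvASet seen (s + p) true) (new ++ [s + p])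
         else pvInnerP n s ps seen new) := rfl

-- pvInnerP returns none exactly when some prime completes s to n
theorem pvInnerP_none_iff (n s : Int) :
    ∀ (ps : List Int) (seen : Array Bool) (new : List Int),
      pvInnerP n s ps seen new = none ↔ ∃ p ∈ ps, s + p = n := by
  intro ps
  induction ps with
  | nil => intro seen new; simp [pvInnerP]
  | cons p ps ih =>
    intro seen new
    rw [pvInnerP_cons]
    by_cases h1 : s + p = n
    · simp [h1]
    · rw [if_neg h1]
      by_cases h2 : s + p < n ∧ pvAGet seen (s + p) false = false
      · rw [if_pos h2, ih]
        simp only [List.mem_cons, exists_eq_or_imp]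
        tauto
      · rw [if_neg h2, ih]
        simp only [List.mem_cons, exists_eq_or_imp]
        tauto

-- effect of pvInnerP when it runs through
theorem pvInnerP_some (N : Nat) (s : Int) (hs : 0 ≤ s) :
    ∀ (ps : List Int), (∀ p ∈ ps, 0 < p) → ps.Pairwise (· < ·) →
    ∀ (seen : Array Bool) (new : List Int) (seen' : Array Bool) (new' : List Int),
      seen.size = N + 1 →
      pvInnerP (N : Int) s ps seen new = some (seen', new') →
      seen'.size = N + 1 ∧
      (∀ t : Nat, t < N →
        ((seen'[t]?.getD false) = true ↔ (seen[t]?.getD false) = true ∨ ∃ p ∈ ps, s + p = (t : Int))) ∧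
      (∀ x : Int, x ∈ new' ↔ x ∈ new ∨
        ∃ t : Nat, t < N ∧ x = (t : Int) ∧ (seen[t]?.getD false) = false ∧ ∃ p ∈ ps, s + p = (t : Int)) := by
  intro ps
  induction ps with
  | nil =>
    intro _ _ seen new seen' new' hsz hsome
    simp only [pvInnerP, Option.some.injEq, Prod.mk.injEq] at hsome
    obtain ⟨rfl, rfl⟩ := hsome
    refine ⟨hsz, ?_, ?_⟩
    · intro t _; simp
    · intro x; simp
  | cons p ps ih =>
    intro hpos hpw seen new seen' new' hsz hsome
    rw [pvInnerP_cons] at hsome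
    by_cases hpn : s + p = (N : Int)
    · rw [if_pos hpn] at hsome; cases hsome
    · rw [if_neg hpn] at hsome
      have hp0 : 0 < p := hpos p List.mem_cons_self
      have h0 : (0 : Int) ≤ s + p := by omega
      have hA : ((s + p).toNat : Int) = s + p := Int.toNat_of_nonneg h0
      have hget : pvAGet seen (s + p) false = (seen[(s + p).toNat]?.getD false) :=
        pvAGet_of_nonneg seen (s + p) false h0
      by_cases htk : s + p < (N : Int) ∧ pvAGet seen (s + p) false = false
      · rw [if_pos htk] at hsome
        have hB : (s + p).toNat < N := by omega
        have hsz1 : (pvASet seen (s + p) true).size = N + 1 := by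
          rw [pvASet_of_nonneg _ _ _ h0, Array.size_setIfInBounds, hsz]
        have hread : ∀ t : Nat, ((pvASet seen (s + p) true)[t]?.getD false)
            = if t = (s + p).toNat then true else (seen[t]?.getD false) := by
          intro t
          rw [pvASet_of_nonneg _ _ _ h0, Array.getElem?_setIfInBounds]
          by_cases het : t = (s + p).toNat
          · rw [if_pos het.symm, if_pos (by omega)]; simp [het]
          · rw [if_neg (fun hh => het hh.symm), if_neg het]
        obtain ⟨ihsz, ihb, ihc⟩ := ih (fun q hq => hpos q (List.mem_cons_of_mem _ hq))
          hpw.of_cons _ _ _ _ hsz1 hsome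
        refine ⟨ihsz, ?_, ?_⟩
        · intro t ht
          rw [ihb t ht, hread t]
          have hk2 : (t = (s + p).toNat) ↔ s + p = (t : Int) := by omega
          constructor
          · rintro (hc | ⟨q, hq1, hq2⟩)
            · by_cases het : t = (s + p).toNat
              · exact Or.inr ⟨p, List.mem_cons_self, hk2.mp het⟩
              · rw [if_neg het] at hc
                exact Or.inl hc
            · exact Or.inr ⟨q, List.mem_cons_of_mem _ hq1, hq2⟩
          · rintro (hc | ⟨q, hq1, hq2⟩)
            · by_cases het : t = (s + p).toNat
              · left; rw [if_pos het]
              · left; rw [if_neg het]; exact hc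
            · rcases List.mem_cons.mp hq1 with rfl | hq1'
              · left; rw [if_pos (hk2.mpr hq2)]
              · right; exact ⟨q, hq1', hq2⟩
        · intro x
          rw [ihc x]
          simp only [List.mem_append, List.mem_singleton]
          constructor
          · rintro ((hx | hx) | ⟨t, ht1, ht2, ht3, q, hq1, hq2⟩)
            · exact Or.inl hx
            · refine Or.inr ⟨(s + p).toNat, hB, by rw [hA, hx], ?_, p, List.mem_cons_self, by rw [hA]⟩
              rw [hget] at htk
              exact htk.2
            · rw [hread t] at ht3
              by_cases het : t = (s + p).toNat
              · rw [if_pos het] at ht3; cases ht3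
              · rw [if_neg het] at ht3
                exact Or.inr ⟨t, ht1, ht2, ht3, q, List.mem_cons_of_mem _ hq1, hq2⟩
          · rintro (hx | ⟨t, ht1, ht2, ht3, q, hq1, hq2⟩)
            · exact Or.inl (Or.inl hx)
            · rcases List.mem_cons.mp hq1 with rfl | hq1'
              · exact Or.inl (Or.inr (by omega))
              · have hne : t ≠ (s + p).toNat := by
                  intro het
                  have : q = p := by omega
                  have := List.rel_of_pairwise_cons hpw hq1'
                  omega
                refine Or.inr ⟨t, ht1, ht2, ?_, q, hq1', hq2⟩
                rw [hread t, if_neg hne]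
                exact ht3
      · rw [if_neg htk] at hsome
        obtain ⟨ihsz, ihb, ihc⟩ := ih (fun q hq => hpos q (List.mem_cons_of_mem _ hq))
          hpw.of_cons _ _ _ _ hsz hsome
        have habsorb : ∀ t : Nat, t < N → s + p = (t : Int) → (seen[t]?.getD false) = true := by
          intro t ht hpt
          have h1 : ¬ (pvAGet seen (s + p) false = false) := fun hc => htk ⟨by omega, hc⟩
          rw [hget] at h1
          have : t = (s + p).toNat := by omega
          subst this
          simpa using h1
        refine ⟨ihsz, ?_, ?_⟩
        · intro t ht
          rw [ihb t ht]
          constructor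
          · rintro (hc | ⟨q, hq1, hq2⟩)
            · exact Or.inl hc
            · exact Or.inr ⟨q, List.mem_cons_of_mem _ hq1, hq2⟩
          · rintro (hc | ⟨q, hq1, hq2⟩)
            · exact Or.inl hc
            · rcases List.mem_cons.mp hq1 with rfl | hq1'
              · exact Or.inl (habsorb t ht hq2)
              · exact Or.inr ⟨q, hq1', hq2⟩
        · intro x
          rw [ihc x]
          constructor
          · rintro (hx | ⟨t, ht1, ht2, ht3, q, hq1, hq2⟩)
            · exact Or.inl hx
            · exact Or.inr ⟨t, ht1, ht2, ht3, q, List.mem_cons_of_mem _ hq1, hq2⟩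
          · rintro (hx | ⟨t, ht1, ht2, ht3, q, hq1, hq2⟩)
            · exact Or.inl hx
            · rcases List.mem_cons.mp hq1 with rfl | hq1'
              · rw [habsorb t ht1 hq2] at ht3; cases ht3
              · exact Or.inr ⟨t, ht1, ht2, ht3, q, hq1', hq2⟩

theorem pvInnerF_cons (S : List Int) (n s : Int) (ss : List Int) (seen : Array Bool) (new : List Int) :
    pvInnerF S n (s :: ss) seen new
      = (match pvInnerP n s S seen new with
         | none => none
         | some (seen', new') => pvInnerF S n ss seen' new') := rfl

theorem pvInnerF_none_iff (S : List Int) (n : Int) :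
    ∀ (ss : List Int) (seen : Array Bool) (new : List Int),
      pvInnerF S n ss seen new = none ↔ ∃ s ∈ ss, ∃ p ∈ S, s + p = n := by
  intro ss
  induction ss with
  | nil => intro seen new; simp [pvInnerF]
  | cons s ss ih =>
    intro seen new
    rw [pvInnerF_cons]
    cases hP : pvInnerP n s S seen new with
    | none =>
      simp only [List.mem_cons, exists_eq_or_imp]
      constructor
      · intro _; exact Or.inl ((pvInnerP_none_iff n s S seen new).mp hP)
      · intro _; trivial
    | some r =>
      obtain ⟨seen1, new1⟩ := r
      rw [ih]
      simp only [List.mem_cons, exists_eq_or_imp]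
      constructor
      · intro h; exact Or.inr h
      · rintro (h | h)
        · exact absurd ((pvInnerP_none_iff n s S seen new).mpr h) (by rw [hP]; simp)
        · exact h

theorem pvInnerF_some (S : List Int) (hS : ∀ p ∈ S, 0 < p) (hSs : S.Pairwise (· < ·)) (N : Nat) :
    ∀ (ss : List Int), (∀ s ∈ ss, 0 ≤ s) →
    ∀ (seen : Array Bool) (new : List Int) (seen' : Array Bool) (new' : List Int),
      seen.size = N + 1 →
      pvInnerF S (N : Int) ss seen new = some (seen', new') →
      seen'.size = N + 1 ∧
      (∀ t : Nat, t < N →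
        ((seen'[t]?.getD false) = true ↔ (seen[t]?.getD false) = true ∨ ∃ s ∈ ss, ∃ p ∈ S, s + p = (t : Int))) ∧
      (∀ x : Int, x ∈ new' ↔ x ∈ new ∨
        ∃ t : Nat, t < N ∧ x = (t : Int) ∧ (seen[t]?.getD false) = false ∧ ∃ s ∈ ss, ∃ p ∈ S, s + p = (t : Int)) := by
  intro ss
  induction ss with
  | nil =>
    intro _ seen new seen' new' hsz hsome
    simp only [pvInnerF, Option.some.injEq, Prod.mk.injEq] at hsome
    obtain ⟨rfl, rfl⟩ := hsome
    refine ⟨hsz, ?_, ?_⟩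
    · intro t _; simp
    · intro x; simp
  | cons s ss ih =>
    intro hnn seen new seen' new' hsz hsome
    rw [pvInnerF_cons] at hsome
    cases hP : pvInnerP (N : Int) s S seen new with
    | none => rw [hP] at hsome; cases hsome
    | some r =>
      obtain ⟨seen1, new1⟩ := r
      rw [hP] at hsome
      change pvInnerF S (N : Int) ss seen1 new1 = some (seen', new') at hsome
      obtain ⟨sz1, b1, c1⟩ := pvInnerP_some N s (hnn s List.mem_cons_self) S hS hSs
        seen new seen1 new1 hsz hP
      obtain ⟨sz', b', c'⟩ := ih (fun q hq => hnn q (List.mem_cons_of_mem _ hq))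
        seen1 new1 seen' new' sz1 hsome
      have hmono : ∀ t : Nat, t < N → (seen[t]?.getD false) = true → (seen1[t]?.getD false) = true :=
        fun t ht h => (b1 t ht).mpr (Or.inl h)
      refine ⟨sz', ?_, ?_⟩
      · intro t ht
        rw [b' t ht, b1 t ht]
        simp only [List.mem_cons, exists_eq_or_imp]
        rw [or_assoc]
      · intro x
        rw [c' x, c1 x]
        constructor
        · rintro ((hx | ⟨t, ht1, ht2, ht3, q, hq1, hq2⟩) | ⟨t, ht1, ht2, ht3, hs⟩)
          · exact Or.inl hx
          · exact Or.inr ⟨t, ht1, ht2, ht3, s, List.mem_cons_self, q, hq1, hq2⟩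
          · obtain ⟨u, hu1, hu2⟩ := hs
            have ht3' : (seen[t]?.getD false) = false := by
              cases hc : (seen[t]?.getD false) with
              | false => rfl
              | true => rw [hmono t ht1 hc] at ht3; cases ht3
            exact Or.inr ⟨t, ht1, ht2, ht3', u, List.mem_cons_of_mem _ hu1, hu2⟩
        · rintro (hx | ⟨t, ht1, ht2, ht3, u, hu1, hu2⟩)
          · exact Or.inl (Or.inl hx)
          · rcases List.mem_cons.mp hu1 with rfl | hu1'
            · exact Or.inl (Or.inr ⟨t, ht1, ht2, ht3, hu2⟩)
            · cases hc : (seen1[t]?.getD false) with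
              | false => exact Or.inr ⟨t, ht1, ht2, hc, u, hu1', hu2⟩
              | true =>
                rcases (b1 t ht1).mp hc with hc' | hc'
                · rw [hc'] at ht3; cases ht3
                · exact Or.inl (Or.inr ⟨t, ht1, ht2, ht3, hc'⟩)

-- an edge out of the frontier witnesses an optimum of at most k+1
theorem pvEdge_step (S : List Int) (hS : ∀ p ∈ S, 0 < p) (N : Nat) (k : Int) (fr : List Int)
    (hfr : pvFrInv S N k fr) (t : Nat)
    (h : ∃ s ∈ fr, ∃ p ∈ S, s + p = (t : Int)) :
    ∃ v, pvMof S t = some v ∧ v ≤ k + 1 := by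
  obtain ⟨s, hs, p, hp, heq⟩ := h
  obtain ⟨u, hu1, rfl, hu3⟩ := (hfr s).mp hs
  have hp0 : 0 < p := hS p hp
  have hu : t - p.toNat = u := by omega
  exact pvMof_step S t k hp hp0 (by omega) (by rw [hu]; exact hu3)

-- an optimum of exactly k+1 is witnessed by an edge out of the frontier
theorem pvEdge_attain (S : List Int) (N : Nat) (k : Int) (hk : 0 ≤ k) (fr : List Int)
    (hfr : pvFrInv S N k fr) (t : Nat) (ht : t ≤ N)
    (h : pvMof S t = some (k + 1)) :
    ∃ s ∈ fr, ∃ p ∈ S, s + p = (t : Int) := by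
  obtain ⟨p, hp, hp0, hpt, hrec⟩ := pvMof_attain S t k hk h
  refine ⟨((t - p.toNat : Nat) : Int), (hfr _).mpr ⟨t - p.toNat, by omega, rfl, hrec⟩, p, hp, by omega⟩

-- one BFS round advances both invariants by one level
theorem pvStepInv (S : List Int) (hS : ∀ p ∈ S, 0 < p) (hSs : S.Pairwise (· < ·)) (N : Nat)
    (k : Int) (hk : 0 ≤ k) (seen : Array Bool) (fr : List Int) (seen' : Array Bool) (new' : List Int)
    (hseen : pvSeenInv S N k seen) (hfr : pvFrInv S N k fr)
    (h : pvInnerF S (N : Int) fr seen [] = some (seen', new')) :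
    pvSeenInv S N (k + 1) seen' ∧ pvFrInv S N (k + 1) new' := by
  have hnn : ∀ s ∈ fr, 0 ≤ s := by
    intro s hs
    obtain ⟨u, _, rfl, _⟩ := (hfr s).mp hs
    omega
  obtain ⟨sz', b', c'⟩ := pvInnerF_some S hS hSs N fr hnn seen [] seen' new' hseen.1 h
  constructor
  · refine ⟨sz', ?_⟩
    intro t ht
    rw [b' t ht]
    constructor
    · rintro (hc | hedge)
      · obtain ⟨j, hj1, hj2⟩ := (hseen.2 t ht).mp hc
        exact ⟨j, by omega, hj2⟩
      · obtain ⟨v, hv1, hv2⟩ := pvEdge_step S hS N k fr hfr t hedge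
        exact ⟨v, hv2, hv1⟩
    · rintro ⟨j, hj1, hj2⟩
      by_cases hjk : j ≤ k
      · exact Or.inl ((hseen.2 t ht).mpr ⟨j, hjk, hj2⟩)
      · have : j = k + 1 := by omega
        subst this
        exact Or.inr (pvEdge_attain S N k hk fr hfr t (by omega) hj2)
  · intro x
    rw [c' x]
    simp only [List.not_mem_nil, false_or]
    constructor
    · rintro ⟨t, ht1, ht2, ht3, hedge⟩
      obtain ⟨v, hv1, hv2⟩ := pvEdge_step S hS N k fr hfr t hedge
      have hvk : ¬ v ≤ k := by
        intro hvk
        have : (seen[t]?.getD false) = true := (hseen.2 t ht1).mpr ⟨v, hvk, hv1⟩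
        rw [ht3] at this; cases this
      exact ⟨t, ht1, ht2, by rw [hv1]; congr 1; omega⟩
    · rintro ⟨t, ht1, ht2, ht3⟩
      refine ⟨t, ht1, ht2, ?_, pvEdge_attain S N k hk fr hfr t (by omega) ht3⟩
      cases hc : (seen[t]?.getD false) with
      | false => rfl
      | true =>
        obtain ⟨j, hj1, hj2⟩ := (hseen.2 t ht1).mp hc
        rw [ht3] at hj2
        injection hj2 with hj2
        omega

-- the main loop lemma, none case: nothing ever completes to n, the loop returns -1
theorem pvLoopB_none (S : List Int) (hS : ∀ p ∈ S, 0 < p) (hSs : S.Pairwise (· < ·)) (N : Nat)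
    (hnone : pvMof S N = none) :
    ∀ (fuel : Nat) (k : Int) (seen : Array Bool) (fr : List Int),
      0 ≤ k → pvSeenInv S N k seen → pvFrInv S N k fr →
      pvLoopB S (N : Int) fuel seen fr k = -1 := by
  intro fuel
  induction fuel with
  | zero => intro k seen fr _ _ _; rfl
  | succ fuel ih =>
    intro k seen fr hk hseen hfr
    cases fr with
    | nil => rfl
    | cons f fs =>
      show (match pvInnerF S (N : Int) (f :: fs) seen [] with
            | none => k + 1
            | some (seen', new') => pvLoopB S (N : Int) fuel seen' new' (k + 1)) = -1
      cases hF : pvInnerF S (N : Int) (f :: fs) seen [] with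
      | none =>
        obtain ⟨v, hv1, _⟩ := pvEdge_step S hS N k (f :: fs) hfr N
          ((pvInnerF_none_iff S (N : Int) (f :: fs) seen []).mp hF)
        rw [hnone] at hv1; cases hv1
      | some r =>
        obtain ⟨seen', new'⟩ := r
        obtain ⟨hseen', hfr'⟩ := pvStepInv S hS hSs N k hk seen (f :: fs) seen' new' hseen hfr hF
        exact ih (k + 1) seen' new' (by omega) hseen' hfr'

-- the main loop lemma, some case: the loop returns the optimum
theorem pvLoopB_some (S : List Int) (hS : ∀ p ∈ S, 0 < p) (hSs : S.Pairwise (· < ·)) (N : Nat)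
    (v : Int) (hv : pvMof S N = some v) :
    ∀ (fuel : Nat) (k : Int) (seen : Array Bool) (fr : List Int),
      0 ≤ k → k < v → v - k ≤ (fuel : Int) →
      pvSeenInv S N k seen → pvFrInv S N k fr →
      pvLoopB S (N : Int) fuel seen fr k = v := by
  intro fuel
  induction fuel with
  | zero => intro k seen fr _ _ hfuel _ _; omega
  | succ fuel ih =>
    intro k seen fr hk hkv hfuel hseen hfr
    obtain ⟨u, hu1, hu2⟩ := pvMof_chain S N v k hv hk hkv
    have hmem : ((u : Nat) : Int) ∈ fr := (hfr _).mpr ⟨u, hu1, rfl, hu2⟩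
    cases fr with
    | nil => cases hmem
    | cons f fs =>
      show (match pvInnerF S (N : Int) (f :: fs) seen [] with
            | none => k + 1
            | some (seen', new') => pvLoopB S (N : Int) fuel seen' new' (k + 1)) = v
      cases hF : pvInnerF S (N : Int) (f :: fs) seen [] with
      | none =>
        obtain ⟨w, hw1, hw2⟩ := pvEdge_step S hS N k (f :: fs) hfr N
          ((pvInnerF_none_iff S (N : Int) (f :: fs) seen []).mp hF)
        rw [hv] at hw1
        injection hw1 with hw1
        show k + 1 = v
        omega
      | some r =>
        obtain ⟨seen', new'⟩ := r
        obtain ⟨hseen', hfr'⟩ := pvStepInv S hS hSs N k hk seen (f :: fs) seen' new' hseen hfr hF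
        have hkv' : k + 1 < v := by
          rcases lt_or_eq_of_le (by omega : k + 1 ≤ v) with h | h
          · exact h
          · exfalso
            have := pvEdge_attain S N k hk (f :: fs) hfr N (le_refl N) (by rw [hv, h])
            rw [(pvInnerF_none_iff S (N : Int) (f :: fs) seen []).mpr this] at hF
            cases hF
        exact ih (k + 1) seen' new' (by omega) hkv' (by push_cast; push_cast at hfuel; omega)
          hseen' hfr'

-- B computes pvMof
theorem pvB_eq (n m : Int) (hn : 0 ≤ n) :
    minNumberOfPrimes_alt n m
      = (match pvMof (pvGeneratePrimes m) n.toNat with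
         | some v => v
         | none => -1) := by
  simp only [minNumberOfPrimes_alt]
  by_cases hn0 : n = 0
  · subst hn0
    rw [if_pos rfl]
    rfl
  · rw [if_neg hn0]
    set S := pvGeneratePrimes m with hSdef
    have hS : ∀ p ∈ S, 0 < p := by
      intro p hp; have := pvGeneratePrimes_two_le m p hp; omega
    have hSs : S.Pairwise (· < ·) := pvGeneratePrimes_sorted m
    set N : Nat := n.toNat with hNdef
    have hnN : ((N : Nat) : Int) = n := Int.toNat_of_nonneg hn
    have hN1 : 1 ≤ N := by omega
    rw [← hnN, show ((N : Int) + 1).toNat = N + 1 by omega,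
      pvASet_of_nonneg (Array.replicate (N + 1) false) 0 true (by norm_num), Int.toNat_zero]
    have hseen0 : pvSeenInv S N 0 ((Array.replicate (N + 1) false).setIfInBounds 0 true) := by
      constructor
      · rw [Array.size_setIfInBounds, Array.size_replicate]
      · intro t ht
        cases t with
        | zero =>
          rw [Array.getElem?_setIfInBounds, if_pos rfl,
            if_pos (by rw [Array.size_replicate]; omega)]
          simp only [Option.getD_some]
          constructor
          · intro _; exact ⟨0, le_refl 0, pvMof_zero S⟩
          · intro _; trivial
        | succ u =>
          rw [Array.getElem?_setIfInBounds, if_neg (by omega), Array.getElem?_replicate,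
            if_pos (by omega)]
          simp only [Option.getD_some]
          constructor
          · intro h; cases h
          · rintro ⟨j, hj1, hj2⟩
            have hj0 := pvMof_nonneg S (u + 1) j hj2
            have : j = 0 := by omega
            subst this
            have := pvMof_some_zero S (u + 1) hj2
            omega
    have hfr0 : pvFrInv S N 0 [0] := by
      intro x
      simp only [List.mem_singleton]
      constructor
      · intro hx
        exact ⟨0, by omega, hx, pvMof_zero S⟩
      · rintro ⟨t, ht1, rfl, ht3⟩
        have := pvMof_some_zero S t ht3
        simp [this]
    cases hMof : pvMof S N with
    | none =>
      exact pvLoopB_none S hS hSs N hMof N 0 _ [0] (le_refl 0) hseen0 hfr0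
    | some v =>
      have hv0 := pvMof_nonneg S N v hMof
      have hvz : v ≠ 0 := by
        intro h
        subst h
        have := pvMof_some_zero S N hMof
        omega
      have hvN := pvMof_le_self S N v hMof
      exact pvLoopB_some S hS hSs N v hMof N 0 _ [0] (le_refl 0) (by omega) (by omega)
        hseen0 hfr0

-- ===== VERDICT (by name: the statement is the Claim_ definition above) =====
theorem minNumberOfPrimes_spec : Claim_equal_minNumberOfPrimes := by
  intro n m _ hPre
  unfold Spec_minNumberOfPrimes
  rw [pvA_eq n m hPre, pvB_eq n m hPre]
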